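-- pv_equiv track=rewrite | github.com/nOOne-is-hier/TIS | SWEA/22576.근의_공식/22576.근의_공식3.py | solve_quadratic_mod2k
-- ===== SOURCE A (Python) =====
-- def solve_quadratic_mod2k(a, b, c, k):
--     """2의 거듭제곱 모듈로에서 이차방정식 해결"""
--     if k == 1:
--         # mod 2에서는 모든 수가 제곱수
--         return 0 if c % 2 == 0 else -1
--
--     if a % 2 == b % 2 == 0:
--         if c % 2 == 1:
--             return -1
--         # 방정식을 2로 나누고 재귀적으로 해결
--         x = solve_quadratic_mod2k(a // 2, b // 2, c // 2, k - 1)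
--         return -1 if x == -1 else (x * 2)
--
--     if a % 2 == 0:
--         # bx ≡ -c (mod 2^k)
--         if b % 2 == 0:
--             return -1
--         return (-c * pow(b, -1, 1 << k)) % (1 << k)
--
--     # Hensel lifting for odd a
--     x = 0
--     for i in range(k):
--         px = (a * x * x + b * x + c) % (1 << (i + 1))
--         if px != 0:
--             if (a * 2 * x + b) % 2 == 1:
--                 x += 1 << i
--     return x
-- ===== SOURCE B (Python) =====
-- def solve_quadratic_mod2k(a, b, c, k):
--     """Iterative version: strip common powers of two with a while loop
--     (instead of A's recursion), dispatch once, then apply the shift."""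
--     shift = 0
--     while k > 1 and a % 2 == 0 and b % 2 == 0:
--         if c % 2 == 1:
--             return -1
--         a //= 2
--         b //= 2
--         c //= 2
--         k -= 1
--         shift += 1
--     if k == 1:
--         res = 0 if c % 2 == 0 else -1
--     elif a % 2 == 0:
--         res = (-c * pow(b, -1, 1 << k)) % (1 << k)
--     else:
--         x = 0
--         for i in range(k):
--             px = (a * x * x + b * x + c) % (1 << (i + 1))
--             if px != 0 and (a * 2 * x + b) % 2 == 1:
--                 x += 1 << i
--         res = x
--     return -1 if res == -1 else res << shift
-- ===== Notes on version B (the rewrite author's own statement) =====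
-- stated objective: alternative
-- what changed: Replaces A's recursive even/even reduction (doubling the result on the way back up) by an iterative stripping loop with a shift accumulator applied once at the end, with dispatch to the base/linear/Hensel cases factored out.
-- outside the precondition, e.g. on solve_quadratic_mod2k(2, 2, 1, 0): A returns -1, B returns 0
import Mathlib
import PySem

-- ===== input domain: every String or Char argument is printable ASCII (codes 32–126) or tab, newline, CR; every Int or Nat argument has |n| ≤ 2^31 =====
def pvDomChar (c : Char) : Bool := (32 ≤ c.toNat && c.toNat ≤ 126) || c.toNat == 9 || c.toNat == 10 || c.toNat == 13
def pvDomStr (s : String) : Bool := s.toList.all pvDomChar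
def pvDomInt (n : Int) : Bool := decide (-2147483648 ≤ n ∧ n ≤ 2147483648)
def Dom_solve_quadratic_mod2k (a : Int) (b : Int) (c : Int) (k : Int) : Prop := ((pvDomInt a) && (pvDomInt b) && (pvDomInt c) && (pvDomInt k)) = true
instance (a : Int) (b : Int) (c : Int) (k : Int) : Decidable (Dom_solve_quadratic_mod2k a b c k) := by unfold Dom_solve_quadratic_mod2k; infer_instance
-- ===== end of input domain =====

-- B replaces A's recursive even/even reduction by an iterative stripping loop with a shift
-- accumulator applied once at the end (a different decomposition, same cost).

-- ===== PORT A =====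
-- pow(b, -1, m): the modular inverse, exact for m = 2^k ≥ 2 and odd b (the only use here);
-- computed by the extended Euclidean algorithm, reduced into [0, m) like Python's pow.
def pyPowInv (b m : Int) : Int :=
  PySem.Int.mod (Nat.gcdA (PySem.Int.mod b m).toNat m.toNat) m

-- A's recursion, with fuel making it total; fuel k.toNat suffices whenever 1 ≤ k
-- (each recursive call decrements k and stops at k = 1).
def solveAgo (fuel : Nat) (a b c k : Int) : Int :=
  match fuel with
  | 0 => 0
  | f + 1 =>
    if k = 1 then
      (if PySem.Int.mod c 2 = 0 then 0 else -1)
    else if PySem.Int.mod a 2 = 0 ∧ PySem.Int.mod b 2 = 0 then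
      if PySem.Int.mod c 2 = 1 then -1
      else
        let x := solveAgo f (PySem.Int.floordiv a 2) (PySem.Int.floordiv b 2)
                   (PySem.Int.floordiv c 2) (k - 1)
        if x = -1 then -1 else x * 2
    else if PySem.Int.mod a 2 = 0 then
      if PySem.Int.mod b 2 = 0 then -1
      else PySem.Int.mod (-c * pyPowInv b (2 ^ k.toNat)) (2 ^ k.toNat)
    else
      -- Hensel lifting for odd a
      (PySem.List.pyRange 0 k 1).foldl (fun x i =>
        let px := PySem.Int.mod (a * x * x + b * x + c) (2 ^ (i + 1).toNat)
        if px ≠ 0 then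
          if PySem.Int.mod (a * 2 * x + b) 2 = 1 then x + 2 ^ i.toNat else x
        else x) 0

def solve_quadratic_mod2k (a : Int) (b : Int) (c : Int) (k : Int) : Int :=
  solveAgo k.toNat a b c k

-- ===== PORT B =====
def henselB (a b c k : Int) : Int :=
  (PySem.List.pyRange 0 k 1).foldl (fun x i =>
    let px := PySem.Int.mod (a * x * x + b * x + c) (2 ^ (i + 1).toNat)
    if px ≠ 0 ∧ PySem.Int.mod (a * 2 * x + b) 2 = 1 then x + 2 ^ i.toNat else x) 0

def dispatchB (a b c k : Int) : Int :=
  if k = 1 then (if PySem.Int.mod c 2 = 0 then 0 else -1)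
  else if PySem.Int.mod a 2 = 0 then
    PySem.Int.mod (-c * pyPowInv b (2 ^ k.toNat)) (2 ^ k.toNat)
  else henselB a b c k

-- Source B's while loop as tail recursion on the same state (a, b, c, k, shift); fuel k.toNat
-- suffices whenever 1 ≤ k since the loop decrements k and stops at k ≤ 1.
def solveBgo (fuel : Nat) (a b c k shift : Int) : Int :=
  match fuel with
  | 0 => 0
  | f + 1 =>
    if k > 1 ∧ PySem.Int.mod a 2 = 0 ∧ PySem.Int.mod b 2 = 0 then
      if PySem.Int.mod c 2 = 1 then -1
      else solveBgo f (PySem.Int.floordiv a 2) (PySem.Int.floordiv b 2)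
             (PySem.Int.floordiv c 2) (k - 1) (shift + 1)
    else
      let res := dispatchB a b c k
      if res = -1 then -1 else res * 2 ^ shift.toNat

def solve_quadratic_mod2k_alt (a : Int) (b : Int) (c : Int) (k : Int) : Int :=
  solveBgo k.toNat a b c k 0

-- ===== PRECONDITION & SPEC =====
-- Pre_ restricts to the natural domain k ≥ 1 of a modulus 2^k. For k ≤ 0 A variously raises
-- (ValueError on 1 << k for k < 0, RecursionError on all-even zero input) or returns
-- accidental values of its reduction bookkeeping; B raises or returns its own values there.
def Pre_solve_quadratic_mod2k (a : Int) (b : Int) (c : Int) (k : Int) : Prop := 1 ≤ k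
instance (a : Int) (b : Int) (c : Int) (k : Int) : Decidable (Pre_solve_quadratic_mod2k a b c k) := by unfold Pre_solve_quadratic_mod2k; infer_instance

def pvWitness_solve_quadratic_mod2k : Int × Int × Int × Int := (3, 5, 7, 4)

def Spec_solve_quadratic_mod2k (a : Int) (b : Int) (c : Int) (k : Int) (out : Int) : Prop := out = solve_quadratic_mod2k_alt a b c k
instance (a : Int) (b : Int) (c : Int) (k : Int) (out : Int) : Decidable (Spec_solve_quadratic_mod2k a b c k out) := by unfold Spec_solve_quadratic_mod2k; infer_instance

-- ===== CLAIM (what is proved, stated in full; the proofs are below) =====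
def Claim_equal_solve_quadratic_mod2k : Prop := ∀ (a : Int) (b : Int) (c : Int) (k : Int), Dom_solve_quadratic_mod2k a b c k → Pre_solve_quadratic_mod2k a b c k → Spec_solve_quadratic_mod2k a b c k (solve_quadratic_mod2k a b c k)

-- ===== LEMMAS AND PROOFS =====

-- On the non-stripping cases A's body (at nonzero fuel) is exactly B's dispatcher.
lemma dispatch_eq (f : Nat) (a b c k : Int)
    (h : k = 1 ∨ ¬(PySem.Int.mod a 2 = 0 ∧ PySem.Int.mod b 2 = 0)) :
    solveAgo (f + 1) a b c k = dispatchB a b c k := by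
  by_cases hk : k = 1
  · simp [solveAgo, dispatchB, hk]
  · have hne : ¬(PySem.Int.mod a 2 = 0 ∧ PySem.Int.mod b 2 = 0) := h.resolve_left hk
    by_cases ha : PySem.Int.mod a 2 = 0
    · have hb : ¬ PySem.Int.mod b 2 = 0 := fun hb => hne ⟨ha, hb⟩
      have ha' : 2 ∣ a := (PySem.Int.mod_eq_zero_iff_dvd a 2).mp ha
      have hb' : ¬ 2 ∣ b := fun hd => hb ((PySem.Int.mod_eq_zero_iff_dvd b 2).mpr hd)
      simp [solveAgo, dispatchB, hk, ha', hb']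
    · have ha' : ¬ 2 ∣ a := fun hd => ha ((PySem.Int.mod_eq_zero_iff_dvd a 2).mpr hd)
      simp only [solveAgo, dispatchB, if_neg hk, if_neg ha,
        if_neg (fun hab => ha (And.left hab) : ¬(PySem.Int.mod a 2 = 0 ∧ PySem.Int.mod b 2 = 0))]
      unfold henselB
      congr 1
      funext x i
      dsimp only
      by_cases hd : (2:Int) ^ (i + 1).toNat ∣ a * x * x + b * x + c <;>
        by_cases hl : (a * 2 * x + b) % 2 = 1 <;> simp [hd, hl]

-- Main invariant: B's loop state (shift) against A's recursion, for sufficient fuel.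
lemma solveBgo_eq (f : Nat) :
    ∀ (a b c k shift : Int), 1 ≤ k → k.toNat ≤ f → 0 ≤ shift →
      solveBgo f a b c k shift =
        (let x := solveAgo f a b c k; if x = -1 then -1 else x * 2 ^ shift.toNat) := by
  induction f with
  | zero => intro a b c k shift hk hf _; omega
  | succ f ih =>
    intro a b c k shift hk hf hs
    by_cases hstrip : k > 1 ∧ PySem.Int.mod a 2 = 0 ∧ PySem.Int.mod b 2 = 0
    · obtain ⟨hk1, ha, hb⟩ := hstrip
      have hkne : ¬ (k = 1) := by omega
      by_cases hc : PySem.Int.mod c 2 = 1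
      · have ha' : 2 ∣ a := (PySem.Int.mod_eq_zero_iff_dvd a 2).mp ha
        have hb' : 2 ∣ b := (PySem.Int.mod_eq_zero_iff_dvd b 2).mp hb
        have hc' : c % 2 = 1 := by rwa [PySem.Int.mod_eq_emod_of_pos (by norm_num)] at hc
        simp [solveBgo, solveAgo, hkne, ha', hb', hc', hk1]
      · have hrec := ih (PySem.Int.floordiv a 2) (PySem.Int.floordiv b 2)
          (PySem.Int.floordiv c 2) (k - 1) (shift + 1) (by omega) (by omega) (by omega)
        simp only [solveBgo, if_pos (⟨hk1, ha, hb⟩ :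
          k > 1 ∧ PySem.Int.mod a 2 = 0 ∧ PySem.Int.mod b 2 = 0), if_neg hc]
        rw [hrec]
        simp only [solveAgo, if_neg hkne, if_pos (⟨ha, hb⟩ :
          PySem.Int.mod a 2 = 0 ∧ PySem.Int.mod b 2 = 0), if_neg hc]
        set x := solveAgo f (PySem.Int.floordiv a 2) (PySem.Int.floordiv b 2)
          (PySem.Int.floordiv c 2) (k - 1) with hx
        by_cases hm1 : x = -1
        · simp [hm1]
        · have h2 : ¬ (x * 2 = -1) := by omega
          have hsn : (shift + 1).toNat = shift.toNat + 1 := by omega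
          simp only [if_neg hm1, if_neg h2, hsn, pow_succ]
          ring
    · have hA : solveAgo (f + 1) a b c k = dispatchB a b c k := by
        apply dispatch_eq
        by_cases hk1 : k = 1
        · exact Or.inl hk1
        · exact Or.inr (fun hab => hstrip ⟨by omega, hab⟩)
      simp only [solveBgo, if_neg hstrip, hA]

theorem solve_quadratic_mod2k_spec_aux (a b c k : Int) (hk : 1 ≤ k) :
    solve_quadratic_mod2k a b c k = solve_quadratic_mod2k_alt a b c k := by
  unfold solve_quadratic_mod2k solve_quadratic_mod2k_alt
  rw [solveBgo_eq k.toNat a b c k 0 hk le_rfl le_rfl]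
  simp

-- ===== VERDICT (by name: the statement is the Claim_ definition above) =====
theorem solve_quadratic_mod2k_spec : Claim_equal_solve_quadratic_mod2k := by
  intro a b c k _ hpre
  unfold Spec_solve_quadratic_mod2k
  exact solve_quadratic_mod2k_spec_aux a b c k hpre
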